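-- pv_equiv track=rewrite | github.com/relyk8/ariadneX | novelty.py | noise_filtered_novelty
-- ===== SOURCE A (Python) =====
-- def noise_filtered_novelty(persistent: dict[str, set[str]],
--                            volatile: dict[str, set[str]],
--                            mutated: dict[str, set[str]]) -> dict[str, int]:
--     """Count items novel vs persistent baseline AND not already seen as volatile.
--
--     persistent: items reliably present across baseline runs
--     volatile:   items that appear in some baseline runs but not all (noise)
--     mutated:    items from the mutated run under test
--
--     An item counts as novel only if it was in neither set — genuinely new
--     behavior surfaced by the mutation, not ambient Windows drift.
--     """
--     out = {}
--     for k in persistent: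
--         known = persistent[k] | volatile[k]
--         out[k] = len(mutated[k] - known)
--     return out
-- ===== SOURCE B (Python) =====
-- def noise_filtered_novelty(persistent: dict[str, set[str]],
--                            volatile: dict[str, set[str]],
--                            mutated: dict[str, set[str]]) -> dict[str, int]:
--     """Sort-and-merge strategy: per key, sort the mutated items and the
--     concatenated baseline items, then count novel items with a two-pointer
--     merge scan over the two sorted lists (no set algebra, no hashing)."""
--     out = {}
--     for k in persistent:
--         p = persistent[k]
--         v = volatile[k]
--         ms = sorted(mutated[k])
--         base = sorted(list(p) + list(v))
--         i = j = c = 0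
--         n, nb = len(ms), len(base)
--         while i < n:
--             if j < nb and base[j] < ms[i]:
--                 j += 1
--             elif j < nb and base[j] == ms[i]:
--                 i += 1
--             else:
--                 c += 1
--                 i += 1
--         out[k] = c
--     return out
-- ===== Notes on version B (the rewrite author's own statement) =====
-- stated objective: alternative
-- what changed: Instead of A's set algebra (union the two baselines, set-difference the mutated set, take len), B sorts the mutated items and the concatenated baseline items per key and counts the novel items with a two-pointer merge scan over the two sorted lists.
import Mathlib
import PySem

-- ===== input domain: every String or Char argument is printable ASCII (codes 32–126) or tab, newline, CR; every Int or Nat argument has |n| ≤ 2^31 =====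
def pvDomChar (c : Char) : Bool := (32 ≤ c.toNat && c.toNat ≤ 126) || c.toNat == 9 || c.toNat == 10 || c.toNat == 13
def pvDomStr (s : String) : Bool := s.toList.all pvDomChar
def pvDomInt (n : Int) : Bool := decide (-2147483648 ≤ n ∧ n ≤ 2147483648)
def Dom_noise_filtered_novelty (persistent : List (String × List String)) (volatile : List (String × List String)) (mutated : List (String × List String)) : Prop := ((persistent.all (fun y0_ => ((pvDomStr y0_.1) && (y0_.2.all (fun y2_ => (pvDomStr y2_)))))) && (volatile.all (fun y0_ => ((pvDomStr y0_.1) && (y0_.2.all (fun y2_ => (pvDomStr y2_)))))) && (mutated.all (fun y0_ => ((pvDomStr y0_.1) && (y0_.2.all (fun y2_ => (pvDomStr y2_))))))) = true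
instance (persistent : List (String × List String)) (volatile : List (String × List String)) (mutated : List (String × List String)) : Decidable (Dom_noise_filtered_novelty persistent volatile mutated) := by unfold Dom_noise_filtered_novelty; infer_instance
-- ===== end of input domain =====

-- B replaces A's set algebra (union, set difference, len) by sorting the mutated
-- items and the concatenated baselines and counting with a two-pointer merge scan;
-- objective: alternative (different algorithm, similar cost).

-- ===== PORT A =====
-- out = {}; for k in persistent: known = persistent[k] | volatile[k]; out[k] = len(mutated[k] - known); return out
-- (missing keys in volatile/mutated raise KeyError in Python; excluded by Pre_, the port totalises the lookup with getD [])
def noise_filtered_novelty (persistent : List (String × List String)) (volatile : List (String × List String)) (mutated : List (String × List String)) : List (String × Int) :=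
  let P : PySem.Dict String (List String) := PySem.Dict.mk persistent
  let V : PySem.Dict String (List String) := PySem.Dict.mk volatile
  let M : PySem.Dict String (List String) := PySem.Dict.mk mutated
  (P.keys.foldl (fun out k =>
      let known : PySem.Set String := PySem.Set.union (P.getD k []) (V.getD k [])
      out.insert k (PySem.Set.len (PySem.Set.diff (M.getD k []) known)))
    PySem.Dict.empty).items

-- ===== PORT B =====
-- the while loop of Source B: each iteration consumes one element of ms (count or match)
-- or one element of base (advance j); indices over the lists become list recursion
def pvCountMissing : List String → List String → Int
  | [], _ => 0
  | x :: ms, [] => 1 + pvCountMissing ms []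
  | x :: ms, b :: bs =>
    if b < x then pvCountMissing (x :: ms) (bs)
    else if b == x then pvCountMissing ms (b :: bs)
    else 1 + pvCountMissing ms (b :: bs)
termination_by ms base => ms.length + base.length

-- out = {}; for k in persistent: p = persistent[k]; v = volatile[k];
--   ms = sorted(mutated[k]); base = sorted(list(p)+list(v)); two-pointer scan; return out
def noise_filtered_novelty_alt (persistent : List (String × List String)) (volatile : List (String × List String)) (mutated : List (String × List String)) : List (String × Int) :=
  let P : PySem.Dict String (List String) := PySem.Dict.mk persistent
  let V : PySem.Dict String (List String) := PySem.Dict.mk volatile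
  let M : PySem.Dict String (List String) := PySem.Dict.mk mutated
  (P.keys.foldl (fun out k =>
      let p := P.getD k []
      let v := V.getD k []
      let ms := PySem.List.sorted (M.getD k []) (fun x => x) false
      let base := PySem.List.sorted (p ++ v) (fun x => x) false
      out.insert k (pvCountMissing ms base))
    PySem.Dict.empty).items

-- ===== PRECONDITION & SPEC =====
-- Pre_ excludes exactly the inputs where Python A raises KeyError: a key of
-- persistent missing from volatile or from mutated.
def Pre_noise_filtered_novelty (persistent : List (String × List String)) (volatile : List (String × List String)) (mutated : List (String × List String)) : Prop :=
  ∀ kv ∈ persistent, ((volatile.map (·.1)).contains kv.1 = true) ∧ ((mutated.map (·.1)).contains kv.1 = true)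
instance (persistent : List (String × List String)) (volatile : List (String × List String)) (mutated : List (String × List String)) : Decidable (Pre_noise_filtered_novelty persistent volatile mutated) := by unfold Pre_noise_filtered_novelty; infer_instance

def pvWitness_noise_filtered_novelty : (List (String × List String)) × (List (String × List String)) × (List (String × List String)) :=
  ([("a", ["x"]), ("b", [])], [("a", []), ("b", ["y"])], [("a", ["x", "z"]), ("b", ["y", "w"])])

def Spec_noise_filtered_novelty (persistent : List (String × List String)) (volatile : List (String × List String)) (mutated : List (String × List String)) (out : List (String × Int)) : Prop := out = noise_filtered_novelty_alt persistent volatile mutated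
instance (persistent : List (String × List String)) (volatile : List (String × List String)) (mutated : List (String × List String)) (out : List (String × Int)) : Decidable (Spec_noise_filtered_novelty persistent volatile mutated out) := by unfold Spec_noise_filtered_novelty; infer_instance

-- ===== CLAIM (what is proved, stated in full; the proofs are below) =====
def Claim_equal_noise_filtered_novelty : Prop := ∀ (persistent : List (String × List String)) (volatile : List (String × List String)) (mutated : List (String × List String)), Dom_noise_filtered_novelty persistent volatile mutated → Pre_noise_filtered_novelty persistent volatile mutated → Spec_noise_filtered_novelty persistent volatile mutated (noise_filtered_novelty persistent volatile mutated)

-- ===== LEMMAS AND PROOFS =====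

-- membership in the union set is the disjunction of the two membership tests
theorem pv_contains_union (p v : List String) (x : String) :
    (PySem.Set.union p v).contains x = (p.contains x || v.contains x) := by
  have := PySem.Set.mem_union p v x
  simp only [PySem.Set.contains_eq_listContains]
  by_cases h : x ∈ PySem.Set.union p v
  · simp [List.contains_iff_mem, (this.mp h)]
  · have h2 := (this.not).mp h
    push_neg at h2
    simp [List.contains_iff_mem, h2.1, h2.2]

-- the length of the set difference equals the not-in-baseline count over m
theorem pv_len_diff_eq_countP (m p v : List String) :
    PySem.Set.len (PySem.Set.diff m (PySem.Set.union p v)) =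
      ((m.countP (fun x => !(p.contains x) && !(v.contains x)) : Nat) : Int) := by
  unfold PySem.Set.len PySem.Set.diff
  rw [List.countP_eq_length_filter]
  congr 2
  apply List.filter_congr
  intro x _
  rw [pv_contains_union]
  cases hp : p.contains x <;> cases hv : v.contains x <;> simp

-- the two-pointer merge scan over two nondecreasing lists counts the elements
-- of ms that are absent from base
theorem pvCountMissing_eq (ms base : List String)
    (hm : ms.Pairwise (· ≤ ·)) (hb : base.Pairwise (· ≤ ·)) :
    pvCountMissing ms base = ((ms.countP (fun x => !(base.contains x)) : Nat) : Int) := by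
  fun_induction pvCountMissing ms base with
  | case1 b => simp
  | case2 x ms ih =>
    rw [ih (List.Pairwise.of_cons hm) hb]
    simp [List.countP_cons]
    omega
  | case3 x ms b bs hlt ih =>
    rw [ih hm (List.Pairwise.of_cons hb)]
    have hx : ∀ y ∈ x :: ms, ((b :: bs).contains y = (bs).contains y) := by
      intro y hy
      have hxy : x ≤ y := by
        rcases hy with _ | hy
        · exact le_refl _
        · exact (List.pairwise_cons.mp hm).1 y (by assumption)
      have hne : y ≠ b := by
        intro h; subst h; exact absurd (lt_of_lt_of_le hlt hxy) (lt_irrefl _)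
      simp only [List.contains_cons]
      simp [hne, Ne.symm hne]
    congr 1
    refine (List.countP_congr ?_).symm
    intro y hy
    simp only [hx y hy]
  | case4 x ms b bs hlt heq ih =>
    rw [ih (List.Pairwise.of_cons hm) hb]
    have hbx : b = x := by simpa using heq
    subst hbx
    simp [List.countP_cons]
  | case5 x ms b bs hlt heq ih =>
    rw [ih (List.Pairwise.of_cons hm) hb]
    have hxb : x < b := by
      rcases lt_trichotomy b x with h | h | h
      · exact absurd h hlt
      · exact absurd (by simpa using h) heq
      · exact h
    have hne : x ≠ b := ne_of_lt hxb
    have hnb : x ∉ bs := by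
      intro hmem
      exact absurd (lt_of_lt_of_le hxb ((List.pairwise_cons.mp hb).1 x hmem)) (lt_irrefl _)
    simp [List.countP_cons, hne, hnb]
    omega

-- sorted lists are nondecreasing (identity key)
theorem pv_sorted_pairwise (xs : List String) :
    (PySem.List.sorted xs (fun x => x) false).Pairwise (· ≤ ·) := by
  simpa using PySem.List.sorted_pairwise xs (fun x => x)

-- the per-key value computed by B equals the per-key value computed by A
theorem pv_key_value_eq (m p v : List String) :
    PySem.Set.len (PySem.Set.diff m (PySem.Set.union p v)) =
      pvCountMissing (PySem.List.sorted m (fun x => x) false)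
        (PySem.List.sorted (p ++ v) (fun x => x) false) := by
  rw [pvCountMissing_eq _ _ (pv_sorted_pairwise m) (pv_sorted_pairwise (p ++ v))]
  rw [pv_len_diff_eq_countP]
  congr 1
  have hperm : (PySem.List.sorted m (fun x => x) false).Perm m :=
    PySem.List.sorted_perm m (fun x => x) false
  rw [hperm.countP_eq]
  apply List.countP_congr
  intro x _
  have hc : ((PySem.List.sorted (p ++ v) (fun x => x) false).contains x)
      = ((p ++ v).contains x) := by
    have := PySem.List.mem_sorted (xs := p ++ v) (key := fun x => x) (rev := false) (x := x)
    by_cases h : x ∈ p ++ v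
    · simp [List.contains_iff_mem, h, this.mpr h]
    · simp [List.contains_iff_mem, h, fun hh => h (this.mp hh)]
  rw [hc]
  cases hp : p.contains x <;> cases hv : v.contains x <;>
    simp_all [List.contains_iff_mem, List.mem_append]

-- ===== VERDICT (by name: the statement is the Claim_ definition above) =====
theorem noise_filtered_novelty_spec : Claim_equal_noise_filtered_novelty := by
  intro persistent volatile mutated _ _
  unfold Spec_noise_filtered_novelty noise_filtered_novelty noise_filtered_novelty_alt
  dsimp only
  congr 2
  funext out k
  exact congrArg (out.insert k)
    (pv_key_value_eq ((PySem.Dict.mk mutated).getD k [])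
      ((PySem.Dict.mk persistent).getD k []) ((PySem.Dict.mk volatile).getD k []))
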